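-- pv_equiv track=rewrite | github.com/PierreSavatte/drugs-n-kebab | dnk/package_restaurant/affichage.py | get_ingredients_from_biblio
-- ===== SOURCE A (Python) =====
-- def get_ingredients_from_biblio(biblio):
--     tabl_chaine_caractere = []
--     chaine_caractere = ""
--     i = 0
--     nb_ingredient_sur_la_ligne = 0
--     for ingredient in biblio:
--         if i < len(biblio) - 1:
--             chaine_caractere += (
--                 ingredient + " = " + str(biblio[ingredient]) + " , "
--             )
--             nb_ingredient_sur_la_ligne += 1
--         else:
--             chaine_caractere += ingredient + " = " + str(biblio[ingredient])
--         i += 1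
--
--         if nb_ingredient_sur_la_ligne == 3:
--             nb_ingredient_sur_la_ligne = 0
--             tabl_chaine_caractere.append(chaine_caractere)
--             chaine_caractere = ""
--     tabl_chaine_caractere.append(chaine_caractere)
--     return tabl_chaine_caractere
-- ===== SOURCE B (Python) =====
-- def get_ingredients_from_biblio(biblio):
--     tokens = [k + " = " + str(v) for k, v in biblio.items()]
--     if not tokens:
--         return [""]
--     body = [t + " , " for t in tokens[:-1]]
--     q = len(body) // 3
--     lines = ["".join(body[3 * i:3 * i + 3]) for i in range(q)]
--     lines.append("".join(body[3 * q:]) + tokens[-1])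
--     return lines
-- ===== Notes on version B (the rewrite author's own statement) =====
-- stated objective: simpler
-- what changed: Replaces the stateful index/line-counter loop with three declarative passes: build the ' , '-separated tokens once, slice the non-last tokens into complete chunks of 3 with join, and append the leftover tokens plus the last token as the final line.
import Mathlib
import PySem

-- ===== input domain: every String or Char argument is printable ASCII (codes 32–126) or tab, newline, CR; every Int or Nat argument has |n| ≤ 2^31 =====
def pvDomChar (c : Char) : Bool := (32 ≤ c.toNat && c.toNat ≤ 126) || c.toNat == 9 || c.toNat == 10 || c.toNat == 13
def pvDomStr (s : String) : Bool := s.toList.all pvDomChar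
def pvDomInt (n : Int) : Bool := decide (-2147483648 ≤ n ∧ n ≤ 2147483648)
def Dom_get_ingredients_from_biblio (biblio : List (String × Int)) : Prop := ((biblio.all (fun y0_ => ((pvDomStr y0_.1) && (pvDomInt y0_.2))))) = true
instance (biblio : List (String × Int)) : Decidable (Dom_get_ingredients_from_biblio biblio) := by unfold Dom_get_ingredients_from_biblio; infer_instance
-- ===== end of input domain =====

-- B replaces A's stateful index/line-counter loop by token building + chunk-of-3 slicing (objective: simpler).
-- The dict parameter is the association list (insertion order, distinct keys), so biblio[ingredient] is the pair's value.

-- ===== PORT A =====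
-- the loop body of A's for-loop, over the state (tabl_chaine_caractere, chaine_caractere, i, nb_ingredient_sur_la_ligne)
def pvStepA (n : Int) (st : List String × String × Int × Int) (ingredient : String × Int) :
    List String × String × Int × Int :=
  let tabl := st.1
  let chaine := st.2.1
  let i := st.2.2.1
  let nb := st.2.2.2
  let (chaine, nb) :=
    if i < n - 1 then
      (chaine ++ (ingredient.1 ++ " = " ++ PySem.Int.toStr ingredient.2 ++ " , "), nb + 1)
    else
      (chaine ++ (ingredient.1 ++ " = " ++ PySem.Int.toStr ingredient.2), nb)
  let i := i + 1
  if nb == 3 then (tabl ++ [chaine], "", i, 0) else (tabl, chaine, i, nb)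

def get_ingredients_from_biblio (biblio : List (String × Int)) : List String :=
  let st := biblio.foldl (pvStepA (PySem.List.len biblio)) ([], "", 0, 0)
  st.1 ++ [st.2.1]

-- ===== PORT B =====
-- q = len(body) // 3 : both operands are nonnegative, so Nat division is Python's //
def get_ingredients_from_biblio_alt (biblio : List (String × Int)) : List String :=
  let tokens := biblio.map (fun p => p.1 ++ " = " ++ PySem.Int.toStr p.2)
  if tokens = [] then [""]
  else
    let body := (PySem.List.slice tokens none (some (-1))).map (fun t => t ++ " , ")
    let q : Nat := body.length / 3
    (PySem.List.pyRange 0 (q : Int) 1).map (fun i =>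
        PySem.Str.join "" (PySem.List.slice body (some (3 * i)) (some (3 * i + 3))))
      ++ [PySem.Str.join "" (PySem.List.slice body (some ((3 * q : Nat) : Int)) none)
            ++ PySem.List.pyGetD tokens (-1) ""]

-- ===== PRECONDITION & SPEC =====
def Spec_get_ingredients_from_biblio (biblio : List (String × Int)) (out : List String) : Prop := out = get_ingredients_from_biblio_alt biblio
instance (biblio : List (String × Int)) (out : List String) : Decidable (Spec_get_ingredients_from_biblio biblio out) := by unfold Spec_get_ingredients_from_biblio; infer_instance

-- ===== CLAIM (what is proved, stated in full; the proofs are below) =====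
def Claim_equal_get_ingredients_from_biblio : Prop := ∀ (biblio : List (String × Int)), Dom_get_ingredients_from_biblio biblio → Spec_get_ingredients_from_biblio biblio (get_ingredients_from_biblio biblio)

-- ===== LEMMAS AND PROOFS =====

-- canonical chunking both ports are reduced to: complete groups of 3 body tokens, then the remainder plus the last token
def chunk3 : List String → String → List String
  | a :: b :: c :: rest, last => ((a ++ b) ++ c) :: chunk3 rest last
  | xs, last => [PySem.Str.join "" xs ++ last]

-- B's pyRange/slice expression in Nat-indexed normal form
def Bform (body : List String) (last : String) : List String :=
  (List.range (body.length / 3)).map (fun k => PySem.Str.join "" ((body.drop (3 * k)).take 3))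
    ++ [PySem.Str.join "" (body.drop (3 * (body.length / 3))) ++ last]

theorem join_empty_nil : PySem.Str.join "" ([] : List String) = "" := by
  simp [PySem.Str.join, PySem.Chars.join, List.intercalate]

theorem join_empty_cons (a : String) (l : List String) :
    PySem.Str.join "" (a :: l) = a ++ PySem.Str.join "" l := by
  cases l with
  | nil => simp [PySem.Str.join, PySem.Chars.join, List.intercalate]
  | cons b t => simp [PySem.Str.join, PySem.Chars.join, List.intercalate, String.ofList_append]

theorem Bform_eq_chunk3 (body : List String) (last : String) :
    Bform body last = chunk3 body last := by
  induction body, last using chunk3.induct with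
  | case1 a b c rest last ih =>
      have hlen : (a :: b :: c :: rest).length / 3 = rest.length / 3 + 1 := by
        simp [List.length]; omega
      rw [chunk3, ← ih]
      simp only [Bform, hlen, List.range_succ_eq_map, List.map_cons, List.map_map, List.cons_append]
      congr 1
      simp [join_empty_cons, join_empty_nil, String.append_assoc]
  | case2 xs last h =>
      have hlen : xs.length / 3 = 0 := by
        rcases xs with _ | ⟨a, _ | ⟨b, _ | ⟨c, r⟩⟩⟩
        · simp
        · simp
        · simp
        · exact absurd rfl (h a b c r)
      rw [chunk3]
      · simp [Bform, hlen]
      · exact h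

theorem altExpr_eq_Bform (body : List String) (last : String) :
    (PySem.List.pyRange 0 ((body.length / 3 : Nat) : Int) 1).map (fun i =>
        PySem.Str.join "" (PySem.List.slice body (some (3 * i)) (some (3 * i + 3))))
      ++ [PySem.Str.join "" (PySem.List.slice body (some ((3 * (body.length / 3) : Nat) : Int)) none) ++ last]
      = Bform body last := by
  unfold Bform
  congr 1
  · rw [PySem.List.pyRange_one]
    simp only [Int.sub_zero, Int.toNat_natCast, List.map_map]
    apply List.map_congr_left
    intro k hk
    simp only [Function.comp, Int.zero_add]
    rw [show (3 : Int) * (k : Int) = ((3 * k : Nat) : Int) from by push_cast; ring,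
        show ((3 * k : Nat) : Int) + 3 = ((3 * k + 3 : Nat) : Int) from by push_cast; ring,
        PySem.List.slice_natCast]
    norm_num
  · rw [PySem.List.slice_from_natCast]

-- the A-loop restricted to the non-last items (whose branch guard is always true), index dropped
def stepB (st : List String × String × Int) (t : String) : List String × String × Int :=
  let ch := st.2.1 ++ t
  let nb := st.2.2 + 1
  if nb == 3 then (st.1 ++ [ch], "", 0) else (st.1, ch, nb)

theorem foldA_prefix (init : List (String × Int)) (n : Int) (tabl : List String)
    (chaine : String) (i nb : Int) (hle : i + init.length ≤ n - 1) :
    init.foldl (pvStepA n) (tabl, chaine, i, nb) =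
      (let r := (init.map (fun p => p.1 ++ " = " ++ PySem.Int.toStr p.2 ++ " , ")).foldl stepB (tabl, chaine, nb)
       (r.1, r.2.1, i + init.length, r.2.2)) := by
  induction init generalizing tabl chaine i nb with
  | nil => simp
  | cons p rest ih =>
      have hi : i < n - 1 := by
        simp [List.length] at hle
        omega
      simp only [List.foldl_cons, List.map_cons]
      rw [pvStepA]
      simp only [if_pos hi]
      simp only [stepB, beq_iff_eq]
      by_cases h3 : nb + 1 = 3
      · rw [if_pos h3, if_pos h3, ih _ _ _ _ (by simp [List.length] at hle ⊢; omega)]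
        simp [List.length]
        omega
      · rw [if_neg h3, if_neg h3, ih _ _ _ _ (by simp [List.length] at hle ⊢; omega)]
        simp [List.length]
        omega

theorem stepB_nb (body : List String) (st : List String × String × Int)
    (h0 : 0 ≤ st.2.2) (h3 : st.2.2 < 3) :
    0 ≤ (body.foldl stepB st).2.2 ∧ (body.foldl stepB st).2.2 < 3 := by
  induction body generalizing st with
  | nil => exact ⟨h0, h3⟩
  | cons t rest ih =>
      simp only [List.foldl_cons]
      by_cases h : st.2.2 + 1 = 3
      · exact ih _ (by simp [stepB, h]) (by simp [stepB, h])
      · exact ih _ (by simp [stepB, h]; omega) (by simp [stepB, h]; omega)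

theorem foldB_chunk3 (body : List String) (tabl : List String) (last : String) :
    (body.foldl stepB (tabl, "", 0)).1 ++ [(body.foldl stepB (tabl, "", 0)).2.1 ++ last]
      = tabl ++ chunk3 body last := by
  induction body, last using chunk3.induct generalizing tabl with
  | case1 a b c rest last ih =>
      rw [chunk3]
      have hstep : (a :: b :: c :: rest).foldl stepB (tabl, "", 0)
          = rest.foldl stepB (tabl ++ ["" ++ a ++ b ++ c], "", 0) := by
        simp [stepB]
      rw [hstep, ih]
      simp [String.append_assoc]
  | case2 xs last h =>
      rw [chunk3]
      · rcases xs with _ | ⟨a, _ | ⟨b, _ | ⟨c, r⟩⟩⟩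
        · simp [join_empty_nil]
        · simp [stepB, join_empty_cons, join_empty_nil]
        · simp [stepB, join_empty_cons, join_empty_nil, String.append_assoc]
        · exact absurd rfl (h a b c r)
      · exact h

-- ===== VERDICT (by name: the statement is the Claim_ definition above) =====
theorem get_ingredients_from_biblio_spec : Claim_equal_get_ingredients_from_biblio := by
  intro biblio _
  unfold Spec_get_ingredients_from_biblio
  rcases List.eq_nil_or_concat biblio with hnil | ⟨init, z, hcat⟩
  · subst hnil
    simp [get_ingredients_from_biblio, get_ingredients_from_biblio_alt]
  · rw [List.concat_eq_append] at hcat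
    subst hcat
    -- A side
    have hA : get_ingredients_from_biblio (init ++ [z])
        = (let r := (init.map (fun p => p.1 ++ " = " ++ PySem.Int.toStr p.2 ++ " , ")).foldl stepB ([], "", 0)
           r.1 ++ [r.2.1 ++ (z.1 ++ " = " ++ PySem.Int.toStr z.2)]) := by
      unfold get_ingredients_from_biblio
      rw [List.foldl_append]
      rw [foldA_prefix init (PySem.List.len (init ++ [z])) [] "" 0 0
            (by simp [PySem.List.len])]
      have hnb := stepB_nb (init.map (fun p => p.1 ++ " = " ++ PySem.Int.toStr p.2 ++ " , ")) ([], "", 0) (by simp) (by simp)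
      simp only [List.foldl_cons, List.foldl_nil, pvStepA]
      have hguard : ¬ ((0 : Int) + init.length < PySem.List.len (init ++ [z]) - 1) := by
        simp [PySem.List.len]
      rw [if_neg hguard]
      have h3 : ¬ ((((init.map (fun p => p.1 ++ " = " ++ PySem.Int.toStr p.2 ++ " , ")).foldl stepB ([], "", 0)).2.2 == 3) = true) := by
        simp only [beq_iff_eq]
        omega
      rw [if_neg h3]
    rw [hA, foldB_chunk3]
    -- B side
    unfold get_ingredients_from_biblio_alt
    have htok : (init ++ [z]).map (fun p => p.1 ++ " = " ++ PySem.Int.toStr p.2)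
        = init.map (fun p => p.1 ++ " = " ++ PySem.Int.toStr p.2) ++ [z.1 ++ " = " ++ PySem.Int.toStr z.2] := by
      simp
    rw [htok, if_neg (by simp)]
    rw [PySem.List.slice_to_neg_one, List.dropLast_concat,
        PySem.List.pyGetD_neg_one_append_singleton, List.map_map]
    have hbody : (init.map (fun p => p.1 ++ " = " ++ PySem.Int.toStr p.2)).map (fun t => t ++ " , ")
        = init.map (fun p => p.1 ++ " = " ++ PySem.Int.toStr p.2 ++ " , ") := by
      simp [Function.comp]
    rw [List.map_map] at *
    rw [hbody] at *
    rw [altExpr_eq_Bform, Bform_eq_chunk3]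
    simp
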